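-- pv_equiv track=rewrite | github.com/mariiio/rally-cut | analysis/scripts/diagnose_cross_team_switch_locality.py | _find_best_permutation
-- ===== SOURCE A (Python) =====
-- import itertools
--
-- def _find_best_permutation(
--     gt_rallies: dict[str, dict[str, int]],
--     pred_rallies: dict[str, dict[str, int]],
-- ) -> tuple[dict[int, int], int, int]:
--     player_ids = [1, 2, 3, 4]
--     best_perm: dict[int, int] = {pid: pid for pid in player_ids}
--     best_c = -1
--     best_t = 0
--     for perm in itertools.permutations(player_ids):
--         pm = {pid: gt for pid, gt in zip(player_ids, perm)}
--         c = 0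
--         t = 0
--         for rid, gt_map in gt_rallies.items():
--             if rid not in pred_rallies:
--                 continue
--             pred_map = pred_rallies[rid]
--             for tid in gt_map:
--                 if tid in pred_map:
--                     t += 1
--                     if pm.get(pred_map[tid]) == gt_map[tid]:
--                         c += 1
--         if c > best_c:
--             best_c = c
--             best_t = t
--             best_perm = pm
--     return best_perm, max(best_c, 0), best_t
-- ===== SOURCE B (Python) =====
-- import itertools
--
--
-- def _find_best_permutation(
--     gt_rallies: dict[str, dict[str, int]],
--     pred_rallies: dict[str, dict[str, int]],
-- ) -> tuple[dict[int, int], int, int]: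
--     # One pass over the data: count every shared (pred_value, gt_value) pair once,
--     # then score each of the 24 permutations from the counts in O(1)-ish time.
--     counts: dict[tuple[int, int], int] = {}
--     t = 0
--     for rid, gt_map in gt_rallies.items():
--         pred_map = pred_rallies.get(rid)
--         if pred_map is None:
--             continue
--         for tid, g in gt_map.items():
--             if tid in pred_map:
--                 t += 1
--                 key = (pred_map[tid], g)
--                 counts[key] = counts.get(key, 0) + 1
--     best_c = -1
--     best = None
--     for perm in itertools.permutations((1, 2, 3, 4)):
--         c = 0
--         for p, g in zip((1, 2, 3, 4), perm):
--             c += counts.get((p, g), 0)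
--         if c > best_c:
--             best_c = c
--             best = perm
--     return dict(zip((1, 2, 3, 4), best)), best_c, t
-- ===== Notes on version B (the rewrite author's own statement) =====
-- stated objective: faster
-- what changed: B scans the rally data once to build a (pred_value, gt_value) co-occurrence counter, then scores each of the 24 permutations from that counter, instead of re-scanning all rallies once per permutation.
import Mathlib
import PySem

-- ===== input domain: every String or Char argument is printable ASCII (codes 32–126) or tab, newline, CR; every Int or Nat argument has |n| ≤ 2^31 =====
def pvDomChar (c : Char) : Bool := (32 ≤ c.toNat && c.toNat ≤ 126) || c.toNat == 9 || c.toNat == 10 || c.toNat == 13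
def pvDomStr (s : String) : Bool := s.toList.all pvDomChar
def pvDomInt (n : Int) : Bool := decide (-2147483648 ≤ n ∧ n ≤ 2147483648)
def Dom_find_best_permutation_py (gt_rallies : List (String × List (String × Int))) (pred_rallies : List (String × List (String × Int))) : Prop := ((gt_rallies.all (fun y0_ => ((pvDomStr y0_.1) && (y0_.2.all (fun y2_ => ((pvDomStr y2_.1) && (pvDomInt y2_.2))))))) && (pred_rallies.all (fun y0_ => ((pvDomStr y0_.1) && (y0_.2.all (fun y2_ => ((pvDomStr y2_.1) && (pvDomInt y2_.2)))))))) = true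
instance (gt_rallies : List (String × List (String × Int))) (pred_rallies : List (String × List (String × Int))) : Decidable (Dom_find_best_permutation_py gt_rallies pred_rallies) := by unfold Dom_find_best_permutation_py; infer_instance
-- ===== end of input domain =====

-- B replaces A's per-permutation rescan of all rallies by one scan that counts
-- (pred_value, gt_value) co-occurrences, then scores each permutation from the counts.

-- ===== PORT A =====
-- A's inner double loop for a fixed player map pm: returns (c, t)
def pvAInner (pm : List (Int × Int)) (gt_rallies pred_rallies : List (String × List (String × Int))) : Int × Int :=
  gt_rallies.foldl (fun ct r =>
    match List.lookup r.1 pred_rallies with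
    | none => ct
    | some pred_map =>
      r.2.foldl (fun ct p =>
        match List.lookup p.1 pred_map with
        | none => ct
        | some pv =>
          ((if List.lookup pv pm = some p.2 then ct.1 + 1 else ct.1), ct.2 + 1)) ct) (0, 0)

def find_best_permutation_py (gt_rallies : List (String × List (String × Int))) (pred_rallies : List (String × List (String × Int))) : (List (Int × Int)) × Int × Int :=
  let player_ids : List Int := [1, 2, 3, 4]
  let st := (PySem.List.permutations player_ids 4).foldl
    (fun (st : (List (Int × Int)) × Int × Int) perm =>
      let pm := player_ids.zip perm
      let ct := pvAInner pm gt_rallies pred_rallies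
      if ct.1 > st.2.1 then (pm, ct.1, ct.2) else st)
    (player_ids.map (fun pid => (pid, pid)), -1, 0)
  (st.1, max st.2.1 0, st.2.2)

-- ===== PORT B =====
-- B's single pass: the (pred_value, gt_value) counter and the shared-key total t
def pvBCounts (gt_rallies pred_rallies : List (String × List (String × Int))) : PySem.Dict (Int × Int) Int × Int :=
  gt_rallies.foldl (fun st r =>
    match List.lookup r.1 pred_rallies with
    | none => st
    | some pred_map =>
      r.2.foldl (fun st p =>
        match List.lookup p.1 pred_map with
        | none => st
        | some pv => (st.1.insert (pv, p.2) (st.1.getD (pv, p.2) 0 + 1), st.2 + 1)) st)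
    (PySem.Dict.empty, 0)

def find_best_permutation_py_alt (gt_rallies : List (String × List (String × Int))) (pred_rallies : List (String × List (String × Int))) : (List (Int × Int)) × Int × Int :=
  let ct := pvBCounts gt_rallies pred_rallies
  let best := (PySem.List.permutations ([1, 2, 3, 4] : List Int) 4).foldl
    (fun (st : Int × Option (List Int)) perm =>
      let c := (([1, 2, 3, 4] : List Int).zip perm).foldl (fun c pg => c + ct.1.getD pg 0) 0
      if c > st.1 then (c, some perm) else st)
    (-1, none)
  match best.2 with
  | some perm => (([1, 2, 3, 4] : List Int).zip perm, best.1, ct.2)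
  | none => ([], best.1, ct.2)

-- ===== PRECONDITION & SPEC =====
def Spec_find_best_permutation_py (gt_rallies : List (String × List (String × Int))) (pred_rallies : List (String × List (String × Int))) (out : (List (Int × Int)) × Int × Int) : Prop := out = find_best_permutation_py_alt gt_rallies pred_rallies
instance (gt_rallies : List (String × List (String × Int))) (pred_rallies : List (String × List (String × Int))) (out : (List (Int × Int)) × Int × Int) : Decidable (Spec_find_best_permutation_py gt_rallies pred_rallies out) := by unfold Spec_find_best_permutation_py; infer_instance

-- ===== CLAIM (what is proved, stated in full; the proofs are below) =====
def Claim_equal_find_best_permutation_py : Prop := ∀ (gt_rallies : List (String × List (String × Int))) (pred_rallies : List (String × List (String × Int))), Dom_find_best_permutation_py gt_rallies pred_rallies → Spec_find_best_permutation_py gt_rallies pred_rallies (find_best_permutation_py gt_rallies pred_rallies)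

-- ===== LEMMAS AND PROOFS =====

-- the multiset of shared (pred_value, gt_value) pairs both loops traverse
def pvPairs (gt_rallies pred_rallies : List (String × List (String × Int))) : List (Int × Int) :=
  gt_rallies.flatMap (fun r =>
    match List.lookup r.1 pred_rallies with
    | none => []
    | some pred_map => r.2.filterMap (fun p => (List.lookup p.1 pred_map).map (fun pv => (pv, p.2))))

def pvSA (l : List (Int × Int)) (perm : List Int) : Int :=
  (l.countP (fun pg => decide (List.lookup pg.1 (([1, 2, 3, 4] : List Int).zip perm) = some pg.2)) : Int)

def pvSB (l : List (Int × Int)) (perm : List Int) : Int :=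
  (([1, 2, 3, 4] : List Int).zip perm).foldl (fun c pg => c + (l.count pg : Int)) 0

lemma pvRowA (pm : List (Int × Int)) (pred_map : List (String × Int)) (ps : List (String × Int)) : ∀ (s : Int × Int),
    ps.foldl (fun ct p =>
        match List.lookup p.1 pred_map with
        | none => ct
        | some pv =>
          ((if List.lookup pv pm = some p.2 then ct.1 + 1 else ct.1), ct.2 + 1)) s
    = (s.1 + (((ps.filterMap (fun p => (List.lookup p.1 pred_map).map (fun pv => (pv, p.2)))).countP
          (fun pg => decide (List.lookup pg.1 pm = some pg.2)) : Nat) : Int),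
       s.2 + (((ps.filterMap (fun p => (List.lookup p.1 pred_map).map (fun pv => (pv, p.2)))).length : Nat) : Int)) := by
  induction ps with
  | nil => intro s; simp
  | cons p ps ih =>
    intro s
    cases h : List.lookup p.1 pred_map with
    | none => simp [h, ih]
    | some pv =>
      simp only [List.foldl_cons, h, List.filterMap_cons, Option.map_some, ih,
        List.countP_cons, List.length_cons, Prod.mk.injEq]
      by_cases hm : List.lookup pv pm = some p.2 <;>
        simp only [hm, decide_true, decide_false, if_true, if_false] <;>
        constructor <;> push_cast <;> ring

lemma pvOuterA (pm : List (Int × Int)) (gt pred : List (String × List (String × Int))) : ∀ (s : Int × Int),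
    gt.foldl (fun ct r =>
      match List.lookup r.1 pred with
      | none => ct
      | some pred_map =>
        r.2.foldl (fun ct p =>
          match List.lookup p.1 pred_map with
          | none => ct
          | some pv =>
            ((if List.lookup pv pm = some p.2 then ct.1 + 1 else ct.1), ct.2 + 1)) ct) s
    = (s.1 + (((pvPairs gt pred).countP (fun pg => decide (List.lookup pg.1 pm = some pg.2)) : Nat) : Int),
       s.2 + (((pvPairs gt pred).length : Nat) : Int)) := by
  induction gt with
  | nil => intro s; simp [pvPairs]
  | cons r gt ih =>
    intro s
    cases h : List.lookup r.1 pred with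
    | none => simp [pvPairs, List.flatMap_cons, h, ih]
    | some pred_map =>
      simp only [List.foldl_cons, h]
      rw [pvRowA pm pred_map r.2, ih]
      simp only [pvPairs, List.flatMap_cons, h, List.countP_append, List.length_append,
        Prod.mk.injEq]
      constructor <;> push_cast <;> ring

lemma pvAInner_eq (perm : List Int) (gt pred : List (String × List (String × Int))) :
    pvAInner (([1, 2, 3, 4] : List Int).zip perm) gt pred
      = (pvSA (pvPairs gt pred) perm, ((pvPairs gt pred).length : Int)) := by
  simp [pvAInner, pvOuterA, pvSA]

lemma pvRowB (pred_map : List (String × Int)) (ps : List (String × Int)) : ∀ (s : PySem.Dict (Int × Int) Int × Int),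
    ps.foldl (fun st p =>
        match List.lookup p.1 pred_map with
        | none => st
        | some pv => (st.1.insert (pv, p.2) (st.1.getD (pv, p.2) 0 + 1), st.2 + 1)) s
    = ((ps.filterMap (fun p => (List.lookup p.1 pred_map).map (fun pv => (pv, p.2)))).foldl
         (fun d pg => d.insert pg (d.getD pg 0 + 1)) s.1,
       s.2 + (((ps.filterMap (fun p => (List.lookup p.1 pred_map).map (fun pv => (pv, p.2)))).length : Nat) : Int)) := by
  induction ps with
  | nil => intro s; simp
  | cons p ps ih =>
    intro s
    cases h : List.lookup p.1 pred_map with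
    | none => simp [h, ih]
    | some pv =>
      simp only [List.foldl_cons, h, List.filterMap_cons, Option.map_some, ih,
        List.length_cons, Prod.mk.injEq]
      constructor
      · trivial
      · push_cast; ring

lemma pvBCounts_eq (gt pred : List (String × List (String × Int))) :
    pvBCounts gt pred
      = ((pvPairs gt pred).foldl (fun d pg => d.insert pg (d.getD pg 0 + 1)) PySem.Dict.empty,
         ((pvPairs gt pred).length : Int)) := by
  suffices h : ∀ (s : PySem.Dict (Int × Int) Int × Int),
      gt.foldl (fun st r =>
        match List.lookup r.1 pred with
        | none => st
        | some pred_map =>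
          r.2.foldl (fun st p =>
            match List.lookup p.1 pred_map with
            | none => st
            | some pv => (st.1.insert (pv, p.2) (st.1.getD (pv, p.2) 0 + 1), st.2 + 1)) st) s
      = ((pvPairs gt pred).foldl (fun d pg => d.insert pg (d.getD pg 0 + 1)) s.1,
         s.2 + (((pvPairs gt pred).length : Nat) : Int)) by
    simpa [pvBCounts] using h (PySem.Dict.empty, 0)
  induction gt with
  | nil => intro s; simp [pvPairs]
  | cons r gt ih =>
    intro s
    cases h : List.lookup r.1 pred with
    | none => simp [pvPairs, List.flatMap_cons, h, ih]
    | some pred_map =>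
      simp only [List.foldl_cons, h]
      rw [pvRowB pred_map r.2, ih]
      simp only [pvPairs, List.flatMap_cons, h, List.length_append, List.foldl_append,
        Prod.mk.injEq]
      constructor
      · trivial
      · push_cast; ring

-- countP by a 4-key lookup table equals the sum of the four counts
lemma pvKey (a b c d : Int) (l : List (Int × Int)) :
    l.countP (fun pg => decide (List.lookup pg.1 ([(1, a), (2, b), (3, c), (4, d)] : List (Int × Int)) = some pg.2))
      = l.count (1, a) + l.count (2, b) + l.count (3, c) + l.count (4, d) := by
  induction l with
  | nil => simp
  | cons x l ih =>
    obtain ⟨k, v⟩ := x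
    simp only [List.countP_cons, List.count_cons, ih]
    by_cases h1 : k = 1
    · subst h1
      by_cases hv : v = a
      · subst hv; simp [List.lookup]; omega
      · have hv' : ¬ a = v := fun h => hv h.symm
        simp [List.lookup, hv, hv']
    · by_cases h2 : k = 2
      · subst h2
        by_cases hv : v = b
        · subst hv; simp [List.lookup]; omega
        · have hv' : ¬ b = v := fun h => hv h.symm
          simp [List.lookup, hv, hv']
      · by_cases h3 : k = 3
        · subst h3
          by_cases hv : v = c
          · subst hv; simp [List.lookup]; omega
          · have hv' : ¬ c = v := fun h => hv h.symm
            simp [List.lookup, hv, hv']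
        · by_cases h4 : k = 4
          · subst h4
            by_cases hv : v = d
            · subst hv; simp [List.lookup]; omega
            · have hv' : ¬ d = v := fun h => hv h.symm
              simp [List.lookup, hv, hv']
          · have e1 : (k == (1 : Int)) = false := by simp [h1]
            have e2 : (k == (2 : Int)) = false := by simp [h2]
            have e3 : (k == (3 : Int)) = false := by simp [h3]
            have e4 : (k == (4 : Int)) = false := by simp [h4]
            simp [List.lookup, e1, e2, e3, e4, h1, h2, h3, h4]

lemma pvScore4 (a b c d : Int) (rest : List Int) (l : List (Int × Int)) :
    pvSA l (a :: b :: c :: d :: rest) = pvSB l (a :: b :: c :: d :: rest) := by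
  have h : (([1, 2, 3, 4] : List Int).zip (a :: b :: c :: d :: rest))
      = ([(1, a), (2, b), (3, c), (4, d)] : List (Int × Int)) := rfl
  simp only [pvSA, pvSB, h, List.foldl_cons, List.foldl_nil, pvKey]
  push_cast
  ring

lemma pvScore_eq (l : List (Int × Int)) :
    ∀ p ∈ PySem.List.permutations ([1, 2, 3, 4] : List Int) 4, pvSA l p = pvSB l p := by
  have h4 : ∀ p ∈ PySem.List.permutations ([1, 2, 3, 4] : List Int) 4, p.length = 4 := by decide
  intro p hp
  match p, h4 p hp with
  | a :: b :: c :: d :: rest, _ => exact pvScore4 a b c d rest l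

lemma pvSA_nonneg (l : List (Int × Int)) (p : List Int) : 0 ≤ pvSA l p := by
  simp [pvSA]

-- the two best-permutation folds stay in lockstep
lemma pvFoldCorr (l : List (Int × Int)) (ps : List (List Int)) :
    ∀ (c0 : Int) (p0 : List Int),
    (∀ p ∈ ps, pvSA l p = pvSB l p) →
    ∃ (p : List Int) (c : Int),
      ps.foldl (fun st perm => if pvSB l perm > st.1 then (pvSB l perm, some perm) else st) (c0, some p0)
        = (c, some p)
      ∧ ps.foldl (fun st perm =>
            if pvSA l perm > st.2.1
            then ((([1, 2, 3, 4] : List Int).zip perm), pvSA l perm, (l.length : Int)) else st)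
          ((([1, 2, 3, 4] : List Int).zip p0), c0, (l.length : Int))
        = ((([1, 2, 3, 4] : List Int).zip p), c, (l.length : Int))
      ∧ c0 ≤ c := by
  induction ps with
  | nil => intro c0 p0 _; exact ⟨p0, c0, rfl, rfl, le_refl _⟩
  | cons q ps ih =>
    intro c0 p0 hps
    have hq : pvSA l q = pvSB l q := hps q (by simp)
    by_cases h : pvSB l q > c0
    · obtain ⟨p, c, hB, hA, hc⟩ := ih (pvSB l q) q (fun p hp => hps p (by simp [hp]))
      refine ⟨p, c, ?_, ?_, le_trans (le_of_lt h) hc⟩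
      · simpa [h] using hB
      · simpa [hq, h] using hA
    · obtain ⟨p, c, hB, hA, hc⟩ := ih c0 p0 (fun p hp => hps p (by simp [hp]))
      refine ⟨p, c, ?_, ?_, hc⟩
      · simpa [h] using hB
      · simpa [hq, h] using hA

lemma pvSB_fold (l : List (Int × Int)) (perm : List Int) :
    (([1, 2, 3, 4] : List Int).zip perm).foldl (fun c pg => c + (l.count pg : Int)) 0 = pvSB l perm := rfl

lemma pvMain (gt pred : List (String × List (String × Int))) :
    find_best_permutation_py gt pred = find_best_permutation_py_alt gt pred := by
  set l := pvPairs gt pred with hl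
  cases hp : PySem.List.permutations ([1, 2, 3, 4] : List Int) 4 with
  | nil => exact absurd hp (by decide)
  | cons q rest =>
    have hscore : ∀ p ∈ q :: rest, pvSA l p = pvSB l p := by
      rw [← hp]; exact pvScore_eq l
    have hq : pvSA l q = pvSB l q := hscore q List.mem_cons_self
    have hq0 : pvSA l q > -1 := lt_of_lt_of_le (by norm_num) (pvSA_nonneg l q)
    obtain ⟨p, c, hB, hA, hc⟩ :=
      pvFoldCorr l rest (pvSA l q) q (fun p hpm => hscore p (List.mem_cons_of_mem _ hpm))
    rw [hq] at hB
    have hc0 : (0 : Int) ≤ c := le_trans (pvSA_nonneg l q) hc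
    have eA : find_best_permutation_py gt pred
        = ((([1, 2, 3, 4] : List Int).zip p), max c 0, (l.length : Int)) := by
      simp only [find_best_permutation_py, hp, List.foldl_cons, pvAInner_eq, ← hl]
      rw [if_pos hq0, hA]
    have eB : find_best_permutation_py_alt gt pred
        = ((([1, 2, 3, 4] : List Int).zip p), c, (l.length : Int)) := by
      simp only [find_best_permutation_py_alt, hp, List.foldl_cons, pvBCounts_eq, ← hl,
        PySem.Dict.getD_foldl_insert_add_one, PySem.Dict.getD_empty, zero_add, pvSB_fold]
      rw [if_pos (hq ▸ hq0), hB]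
    rw [eA, eB, max_eq_left hc0]

-- ===== VERDICT (by name: the statement is the Claim_ definition above) =====
theorem find_best_permutation_py_spec : Claim_equal_find_best_permutation_py := by
  intro gt pred _
  unfold Spec_find_best_permutation_py
  exact pvMain gt pred
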